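-- pv_equiv track=rewrite | github.com/cloudrift-ai/deplodock | scripts/diagnostics/scheduling_analysis.py | lds_to_next_lds_spacing
-- ===== SOURCE A (Python) =====
-- def lds_to_next_lds_spacing(insns: list[tuple[int, str, str]]) -> list[int]:
--     """For each LDS.*, count FFMAs between it and the next LDS.* instruction."""
--     out: list[int] = []
--     last_lds_idx = None
--     last_lds_ffma_count = 0
--     for i, (_, mnem, _) in enumerate(insns):
--         if mnem.startswith("LDS"):
--             if last_lds_idx is not None:
--                 out.append(last_lds_ffma_count)
--             last_lds_idx = i
--             last_lds_ffma_count = 0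
--         elif mnem == "FFMA":
--             if last_lds_idx is not None:
--                 last_lds_ffma_count += 1
--     return out
-- ===== SOURCE B (Python) =====
-- def lds_to_next_lds_spacing(insns: list[tuple[int, str, str]]) -> list[int]:
--     """For each LDS.*, count FFMAs between it and the next LDS.* instruction."""
--     lds = [i for i, (_, m, _) in enumerate(insns) if m.startswith("LDS")]
--     return [sum(1 for (_, m, _) in insns[a + 1:b] if m == "FFMA")
--             for a, b in zip(lds, lds[1:])]
-- ===== Notes on version B (the rewrite author's own statement) =====
-- stated objective: alternative
-- what changed: Replaces the streaming accumulator (last LDS index + running FFMA counter carried through one loop) by an index-table decomposition: one pass collects the positions of LDS instructions, then each consecutive pair (a, b) yields the count of FFMA in the slice insns[a+1:b].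
import Mathlib
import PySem

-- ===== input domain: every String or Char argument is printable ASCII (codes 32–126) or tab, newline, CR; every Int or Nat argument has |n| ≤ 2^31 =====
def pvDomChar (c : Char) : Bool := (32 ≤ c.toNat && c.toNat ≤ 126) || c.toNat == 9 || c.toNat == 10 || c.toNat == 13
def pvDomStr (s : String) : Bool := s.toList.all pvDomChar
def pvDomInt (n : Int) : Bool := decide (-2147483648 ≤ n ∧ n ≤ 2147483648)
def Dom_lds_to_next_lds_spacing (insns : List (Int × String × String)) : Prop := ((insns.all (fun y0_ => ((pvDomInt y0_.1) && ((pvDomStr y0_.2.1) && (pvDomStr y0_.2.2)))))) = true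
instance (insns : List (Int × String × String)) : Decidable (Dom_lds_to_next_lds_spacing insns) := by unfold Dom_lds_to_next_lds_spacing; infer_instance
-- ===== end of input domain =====

-- B replaces A's streaming accumulator loop by an LDS-index table consumed pairwise with slice counts (alternative decomposition, same cost).


-- shared predicates: mnem.startswith("LDS") and mnem == "FFMA" on an instruction triple
def pvIsLds (t : Int × String × String) : Bool := PySem.Str.startswith t.2.1 "LDS"
def pvIsFfma (t : Int × String × String) : Bool := t.2.1 == "FFMA"

-- ===== PORT A =====
-- loop body of A: state (out, last_lds_idx, last_lds_ffma_count)
def pvStepA (st : List Int × Option Int × Int) (p : Int × (Int × String × String)) :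
    List Int × Option Int × Int :=
  if pvIsLds p.2 then
    ((match st.2.1 with | some _ => st.1 ++ [st.2.2] | none => st.1), some p.1, 0)
  else if pvIsFfma p.2 then
    (st.1, st.2.1, match st.2.1 with | some _ => st.2.2 + 1 | none => st.2.2)
  else st

def lds_to_next_lds_spacing (insns : List (Int × String × String)) : List Int :=
  ((PySem.List.enumerate insns).foldl pvStepA ([], none, 0)).1

-- ===== PORT B =====
-- [i for i, (_, m, _) in enumerate(insns) if m.startswith("LDS")]
def pvLds (insns : List (Int × String × String)) : List Int :=
  (PySem.List.enumerate insns).filterMap (fun p => if pvIsLds p.2 then some p.1 else none)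

-- sum(1 for (_, m, _) in xs if m == "FFMA")
def pvFfmaSum (xs : List (Int × String × String)) : Int :=
  ((xs.filter pvIsFfma).map (fun _ => (1 : Int))).sum

def lds_to_next_lds_spacing_alt (insns : List (Int × String × String)) : List Int :=
  let lds := pvLds insns
  (lds.zip lds.tail).map
    (fun ab => pvFfmaSum (PySem.List.slice insns (some (ab.1 + 1)) (some ab.2)))

-- ===== PRECONDITION & SPEC =====
def Spec_lds_to_next_lds_spacing (insns : List (Int × String × String)) (out : List Int) : Prop := out = lds_to_next_lds_spacing_alt insns
instance (insns : List (Int × String × String)) (out : List Int) : Decidable (Spec_lds_to_next_lds_spacing insns out) := by unfold Spec_lds_to_next_lds_spacing; infer_instance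

-- ===== CLAIM (what is proved, stated in full; the proofs are below) =====
def Claim_equal_lds_to_next_lds_spacing : Prop := ∀ (insns : List (Int × String × String)), Dom_lds_to_next_lds_spacing insns → Spec_lds_to_next_lds_spacing insns (lds_to_next_lds_spacing insns)

-- ===== LEMMAS AND PROOFS =====

-- mid-level characterisation of A's loop: Option state = "has a last LDS been seen (with current count)"
def pvGo : List (Int × String × String) → Option Int → List Int
  | [], _ => []
  | x :: xs, none => if pvIsLds x then pvGo xs (some 0) else pvGo xs none
  | x :: xs, some c =>
      if pvIsLds x then c :: pvGo xs (some 0)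
      else pvGo xs (some (if pvIsFfma x then c + 1 else c))

lemma pvFoldA (ps : List (Int × (Int × String × String))) :
    ∀ (out : List Int) (o : Option Int) (c : Int),
      ((ps.foldl pvStepA (out, o, c)).1) = out ++ pvGo (ps.map Prod.snd) (o.map fun _ => c) := by
  induction ps with
  | nil => intro out o c; cases o <;> simp [pvGo]
  | cons p ps ih =>
      intro out o c
      simp only [List.foldl_cons, List.map_cons]
      by_cases hL : pvIsLds p.2
      · cases o <;> simp [pvStepA, hL, pvGo, ih]
      · by_cases hF : pvIsFfma p.2
        · cases o <;> simp [pvStepA, hL, hF, pvGo, ih]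
        · cases o <;> simp [pvStepA, hL, hF, pvGo, ih]

lemma pvA_eq_go (insns : List (Int × String × String)) :
    lds_to_next_lds_spacing insns = pvGo insns none := by
  simp [lds_to_next_lds_spacing, pvFoldA, PySem.List.map_snd_enumerate]

lemma pvLds_enum_shift (xs : List (Int × String × String)) :
    ∀ s : Int,
      (PySem.List.enumerate xs (s + 1)).filterMap (fun p => if pvIsLds p.2 then some p.1 else none)
      = ((PySem.List.enumerate xs s).filterMap (fun p => if pvIsLds p.2 then some p.1 else none)).map (· + 1) := by
  induction xs with
  | nil => intro s; simp [PySem.List.enumerate_nil]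
  | cons x xs ih =>
      intro s
      simp only [PySem.List.enumerate_cons, List.filterMap_cons]
      by_cases hL : pvIsLds x <;> simp [hL, ih (s + 1)]

lemma pvLds_cons (x : Int × String × String) (xs : List (Int × String × String)) :
    pvLds (x :: xs) = (if pvIsLds x then [(0 : Int)] else []) ++ (pvLds xs).map (· + 1) := by
  have h := pvLds_enum_shift xs 0
  simp only [pvLds, PySem.List.enumerate_cons, List.filterMap_cons]
  norm_num at h
  by_cases hL : pvIsLds x <;> simp [hL, h]

lemma pvEnumFstGe (xs : List (Int × String × String)) :
    ∀ (s : Int) (p : Int × (Int × String × String)), p ∈ PySem.List.enumerate xs s → s ≤ p.1 := by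
  induction xs with
  | nil => intro s p h; simp [PySem.List.enumerate_nil] at h
  | cons x xs ih =>
      intro s p h
      rw [PySem.List.enumerate_cons, List.mem_cons] at h
      rcases h with rfl | h
      · simp
      · have := ih (s + 1) p h; omega

lemma pvLds_nonneg (xs : List (Int × String × String)) {a : Int} (h : a ∈ pvLds xs) : 0 ≤ a := by
  rw [pvLds] at h
  obtain ⟨p, hp, hfa⟩ := List.mem_filterMap.1 h
  have hs := pvEnumFstGe xs 0 p hp
  by_cases hL : pvIsLds p.2
  · simp [hL] at hfa; omega
  · simp [hL] at hfa

lemma pvFfmaSum_cons (x : Int × String × String) (xs : List (Int × String × String)) :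
    pvFfmaSum (x :: xs) = (if pvIsFfma x then 1 else 0) + pvFfmaSum xs := by
  by_cases hF : pvIsFfma x <;> simp [pvFfmaSum, hF]

lemma pvSliceShift {α : Type} (y : α) (xs : List α) (a b : Int) (ha : 0 ≤ a) (hb : 0 ≤ b) :
    PySem.List.slice (y :: xs) (some (a + 1)) (some (b + 1)) = PySem.List.slice xs (some a) (some b) := by
  obtain ⟨m, rfl⟩ := Int.eq_ofNat_of_zero_le ha
  obtain ⟨k, rfl⟩ := Int.eq_ofNat_of_zero_le hb
  have h1 : (m : Int) + 1 = ((m + 1 : Nat) : Int) := by push_cast; ring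
  have h2 : (k : Int) + 1 = ((k + 1 : Nat) : Int) := by push_cast; ring
  rw [h1, h2, PySem.List.slice_natCast, PySem.List.slice_natCast]
  simp [Nat.succ_sub_succ]

lemma pvSliceConsTop {α : Type} (y : α) (xs : List α) (p : Int) (hp : 0 ≤ p) :
    PySem.List.slice (y :: xs) (some 0) (some (p + 1)) = y :: PySem.List.slice xs (some 0) (some p) := by
  obtain ⟨m, rfl⟩ := Int.eq_ofNat_of_zero_le hp
  have h1 : (m : Int) + 1 = ((m + 1 : Nat) : Int) := by push_cast; ring
  have h0 : (0 : Int) = ((0 : Nat) : Int) := rfl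
  rw [h1, h0, PySem.List.slice_natCast, PySem.List.slice_natCast]
  simp

lemma pvSliceZero {α : Type} (xs : List α) :
    PySem.List.slice xs none (some 0) = [] := by
  have h0 : (0 : Int) = ((0 : Nat) : Int) := rfl
  rw [h0, PySem.List.slice_to_natCast]
  simp

lemma pvPairShift (y : Int × String × String) (xs : List (Int × String × String))
    (l : List Int) (h : ∀ a ∈ l, 0 ≤ a) :
    ((l.map (· + 1)).zip ((l.map (· + 1)).tail)).map
      (fun ab => pvFfmaSum (PySem.List.slice (y :: xs) (some (ab.1 + 1)) (some ab.2)))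
    = (l.zip l.tail).map
      (fun ab => pvFfmaSum (PySem.List.slice xs (some (ab.1 + 1)) (some ab.2))) := by
  rw [← List.map_tail, List.zip_map, List.map_map]
  apply List.map_congr_left
  intro ab hab
  obtain ⟨a, b⟩ := ab
  obtain ⟨hal, hbl⟩ := List.of_mem_zip hab
  have ha : 0 ≤ a := h a hal
  have hb : 0 ≤ b := h b (List.mem_of_mem_tail hbl)
  simp only [Prod.map, Function.comp]
  exact congrArg pvFfmaSum (pvSliceShift y xs (a + 1) b (by omega) hb)

lemma pvMain (xs : List (Int × String × String)) :
    pvGo xs none = lds_to_next_lds_spacing_alt xs ∧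
    ∀ c : Int, pvGo xs (some c) =
      (match pvLds xs with
       | [] => []
       | p :: _ => (c + pvFfmaSum (PySem.List.slice xs (some 0) (some p))) :: lds_to_next_lds_spacing_alt xs) := by
  induction xs with
  | nil =>
      constructor
      · simp [pvGo, lds_to_next_lds_spacing_alt, pvLds, PySem.List.enumerate_nil]
      · intro c; simp [pvGo, pvLds, PySem.List.enumerate_nil]
  | cons x t ih =>
      obtain ⟨ih1, ih2⟩ := ih
      have hshift := pvPairShift x t (pvLds t) (fun a ha => pvLds_nonneg t ha)
      by_cases hL : pvIsLds x
      · -- pvLds (x :: t) = 0 :: (pvLds t).map (·+1)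
        have hlds : pvLds (x :: t) = (0 : Int) :: (pvLds t).map (· + 1) := by
          simp [pvLds_cons, hL]
        have halt : lds_to_next_lds_spacing_alt (x :: t) =
            (match pvLds t with
             | [] => []
             | p :: _ => pvFfmaSum (PySem.List.slice t (some 0) (some p)) ::
                 lds_to_next_lds_spacing_alt t) := by
          cases hpl : pvLds t with
          | nil => simp [lds_to_next_lds_spacing_alt, hlds, hpl]
          | cons p r =>
              have hp : 0 ≤ p := pvLds_nonneg t (by rw [hpl]; exact List.mem_cons_self)
              have h1 : pvFfmaSum (PySem.List.slice (x :: t) (some ((0 : Int) + 1)) (some (p + 1)))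
                  = pvFfmaSum (PySem.List.slice t (some 0) (some p)) :=
                congrArg pvFfmaSum (pvSliceShift x t 0 p le_rfl hp)
              rw [hpl] at hshift
              simp only [List.map_cons, List.tail_cons] at hshift
              simp only [lds_to_next_lds_spacing_alt, hlds, hpl, List.map_cons, List.tail_cons,
                List.zip_cons_cons, List.map_cons, zero_add] at h1 ⊢
              exact congrArg₂ List.cons h1 hshift
        have hgo0 : pvGo t (some 0) = lds_to_next_lds_spacing_alt (x :: t) := by
          rw [ih2 0, halt]
          cases hpl : pvLds t with
          | nil => simp
          | cons p r => simp
        constructor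
        · simpa [pvGo, hL] using hgo0
        · intro c
          have : pvGo (x :: t) (some c) = c :: pvGo t (some 0) := by simp [pvGo, hL]
          rw [this, hgo0, hlds]
          simp [pvSliceZero, pvFfmaSum]
      · -- pvLds (x :: t) = (pvLds t).map (·+1)
        have hlds : pvLds (x :: t) = (pvLds t).map (· + 1) := by
          simp [pvLds_cons, hL]
        have halt : lds_to_next_lds_spacing_alt (x :: t) = lds_to_next_lds_spacing_alt t := by
          simp only [lds_to_next_lds_spacing_alt, hlds]
          exact hshift
        constructor
        · simp [pvGo, hL, ih1, halt]
        · intro c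
          have hstep : pvGo (x :: t) (some c) = pvGo t (some (if pvIsFfma x then c + 1 else c)) := by
            simp [pvGo, hL]
          rw [hstep, ih2]
          cases hpl : pvLds t with
          | nil => simp [hlds, hpl]
          | cons p r =>
              have hp : 0 ≤ p := pvLds_nonneg t (by rw [hpl]; exact List.mem_cons_self)
              simp only [hlds, hpl, List.map_cons]
              rw [halt, pvSliceConsTop x t p hp, pvFfmaSum_cons]
              by_cases hF : pvIsFfma x
              · simp [hF]; ring_nf
              · simp [hF]

-- ===== VERDICT (by name: the statement is the Claim_ definition above) =====
theorem lds_to_next_lds_spacing_spec : Claim_equal_lds_to_next_lds_spacing := by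
  intro insns _
  unfold Spec_lds_to_next_lds_spacing
  rw [pvA_eq_go]
  exact (pvMain insns).1
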